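-- pv_equiv track=rewrite | github.com/enu-sav/enu_django | uctovnictvo/common.py | dohoda_skryt_sekcie
-- ===== SOURCE A (Python) =====
-- def dohoda_skryt_sekcie(text, dtype):
--     #Sekcie v dokumente, ktoré možno skryť
--     #Po pridaní novej sekcie treba sem pridať
--     sekcie = [
--         'text:name="DoBPS_podmienky"',
--         'text:name="DoVP_vyplata"',
--         'text:name="DoPC_vyplata"',
--         'text:name="DoBPS_vyplata"',
--         'text:name="DoPC_DoBPS_paska"',
--         'text:name="DoPC_DoVP_vyhlasenie"',
--         'text:name="DoBPS_vyhlasenie"',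
--         'text:name="DoBPS_priloha"',
--     ]
--     for sekcia in sekcie:
--        if not dtype in sekcia:
--         text = text.replace(sekcia, f'{sekcia} text:display="none"')
--     return text
-- ===== SOURCE B (Python) =====
-- def dohoda_skryt_sekcie(text, dtype):
--     # Sections that may be hidden; one single left-to-right pass instead of 8 replace passes.
--     sekcie = [
--         'text:name="DoBPS_podmienky"',
--         'text:name="DoVP_vyplata"',
--         'text:name="DoPC_vyplata"',
--         'text:name="DoBPS_vyplata"',
--         'text:name="DoPC_DoBPS_paska"',
--         'text:name="DoPC_DoVP_vyhlasenie"',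
--         'text:name="DoBPS_vyhlasenie"',
--         'text:name="DoBPS_priloha"',
--     ]
--     kept = [s for s in sekcie if dtype not in s]
--     if not kept:
--         return text
--     out = []
--     i = 0
--     n = len(text)
--     while i < n:
--         for s in kept:
--             if text.startswith(s, i):
--                 out.append(s + ' text:display="none"')
--                 i += len(s)
--                 break
--         else:
--             out.append(text[i])
--             i += 1
--     return ''.join(out)
-- ===== Notes on version B (the rewrite author's own statement) =====
-- stated objective: alternative
-- what changed: Replaced the 8 sequential str.replace passes (each rescanning and rebuilding the whole text) with a single left-to-right pass that, at each position, matches any kept section and inserts the display:none attribute in place.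
import Mathlib
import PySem

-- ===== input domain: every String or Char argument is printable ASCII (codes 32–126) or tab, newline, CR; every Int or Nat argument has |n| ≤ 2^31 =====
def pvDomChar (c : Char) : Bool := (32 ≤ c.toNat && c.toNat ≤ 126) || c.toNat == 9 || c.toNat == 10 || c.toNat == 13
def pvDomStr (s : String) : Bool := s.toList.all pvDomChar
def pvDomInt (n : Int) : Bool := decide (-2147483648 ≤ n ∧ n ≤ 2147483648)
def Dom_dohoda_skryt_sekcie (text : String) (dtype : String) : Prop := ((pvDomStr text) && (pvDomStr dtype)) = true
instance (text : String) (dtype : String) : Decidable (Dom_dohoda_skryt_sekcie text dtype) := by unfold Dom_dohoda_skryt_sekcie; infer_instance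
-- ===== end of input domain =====

-- B replaces A's 8 sequential str.replace passes by one left-to-right scan that inserts
-- the display:none attribute after any kept section; same return value (alternative structure).

-- ===== PORT A =====
def pvSekcieA : List String := [
  "text:name=\"DoBPS_podmienky\"",
  "text:name=\"DoVP_vyplata\"",
  "text:name=\"DoPC_vyplata\"",
  "text:name=\"DoBPS_vyplata\"",
  "text:name=\"DoPC_DoBPS_paska\"",
  "text:name=\"DoPC_DoVP_vyhlasenie\"",
  "text:name=\"DoBPS_vyhlasenie\"",
  "text:name=\"DoBPS_priloha\""]

def dohoda_skryt_sekcie (text : String) (dtype : String) : String :=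
  pvSekcieA.foldl (fun t sekcia =>
    if !(PySem.Str.isIn dtype sekcia) then
      PySem.Str.replace t sekcia (sekcia ++ " text:display=\"none\"")
    else t) text

-- ===== PORT B =====
def pvSekcieB : List String := [
  "text:name=\"DoBPS_podmienky\"",
  "text:name=\"DoVP_vyplata\"",
  "text:name=\"DoPC_vyplata\"",
  "text:name=\"DoBPS_vyplata\"",
  "text:name=\"DoPC_DoBPS_paska\"",
  "text:name=\"DoPC_DoVP_vyhlasenie\"",
  "text:name=\"DoBPS_vyhlasenie\"",
  "text:name=\"DoBPS_priloha\""]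

def pvSuf : List Char := " text:display=\"none\"".toList

-- the single left-to-right pass of Source B (while-loop over i, first kept section matching at i)
def pvScan (kept : List (List Char)) : List Char → List Char
  | [] => []
  | c :: t =>
    match kept.find? (fun s => s.isPrefixOf (c :: t)) with
    | some s => (s ++ pvSuf) ++ pvScan kept (t.drop (s.length - 1))
    | none => c :: pvScan kept t
termination_by l => l.length
decreasing_by all_goals simp

def dohoda_skryt_sekcie_alt (text : String) (dtype : String) : String :=
  let kept := pvSekcieB.filter (fun s => !(PySem.Str.isIn dtype s))
  if kept.isEmpty then text
  else String.ofList (pvScan (kept.map String.toList) text.toList)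

-- ===== PRECONDITION & SPEC =====
def Spec_dohoda_skryt_sekcie (text : String) (dtype : String) (out : String) : Prop := out = dohoda_skryt_sekcie_alt text dtype
instance (text : String) (dtype : String) (out : String) : Decidable (Spec_dohoda_skryt_sekcie text dtype out) := by unfold Spec_dohoda_skryt_sekcie; infer_instance

-- ===== CLAIM (what is proved, stated in full; the proofs are below) =====
def Claim_equal_dohoda_skryt_sekcie : Prop := ∀ (text : String) (dtype : String), Dom_dohoda_skryt_sekcie text dtype → Spec_dohoda_skryt_sekcie text dtype (dohoda_skryt_sekcie text dtype)

-- ===== LEMMAS AND PROOFS =====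

def pvSekL : List (List Char) := pvSekcieA.map String.toList

-- decidable side conditions for a pair of distinct sections k, s:
-- no nonempty suffix of s is a prefix of k ++ pvSuf nor an extension of k, and
-- no nonempty suffix of k ++ pvSuf is prefix-comparable with s
def pvPairOK (s k : List Char) : Bool :=
  decide (s.length ≤ k.length + pvSuf.length) &&
  s.tails.all (fun p => p.isEmpty || (!(p.isPrefixOf (k ++ pvSuf)) && !(k.isPrefixOf p))) &&
  (k ++ pvSuf).tails.all (fun w => w.isEmpty || (!(w.isPrefixOf s) && !(s.isPrefixOf w)))

def pvOKsk (s k : List Char) : Prop :=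
  s.length ≤ k.length + pvSuf.length ∧
  ∀ p, p <:+ s → p ≠ [] → ¬ p <+: (k ++ pvSuf) ∧ ¬ k <+: p

def pvOKks (s k : List Char) : Prop :=
  ∀ w, w <:+ (k ++ pvSuf) → w ≠ [] → ¬ w <+: s ∧ ¬ s <+: w

def pvGOOD (s : List Char) (K : List (List Char)) : Prop :=
  s ≠ [] ∧ ∀ k ∈ K, k ≠ [] ∧ pvOKsk s k ∧ pvOKks s k

theorem pvPairOK_correct (s k : List Char) (h : pvPairOK s k = true) : pvOKsk s k ∧ pvOKks s k := by
  simp only [pvPairOK, Bool.and_eq_true, List.all_eq_true, decide_eq_true_eq] at h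
  obtain ⟨⟨hlen, h1⟩, h2⟩ := h
  refine ⟨⟨hlen, fun p hp hne => ?_⟩, fun w hw hne => ?_⟩
  · have := h1 p ((List.mem_tails _ _).2 hp)
    simp [List.isEmpty_iff, hne] at this
    exact ⟨by rw [← List.isPrefixOf_iff_prefix]; simp [this.1],
           by rw [← List.isPrefixOf_iff_prefix]; simp [this.2]⟩
  · have := h2 w ((List.mem_tails _ _).2 hw)
    simp [List.isEmpty_iff, hne] at this
    exact ⟨by rw [← List.isPrefixOf_iff_prefix]; simp [this.1],
           by rw [← List.isPrefixOf_iff_prefix]; simp [this.2]⟩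

theorem pv_master_pair : ∀ s ∈ pvSekL, ∀ k ∈ pvSekL, s ≠ k → pvPairOK s k = true := by decide

theorem pv_master_ne : ∀ s ∈ pvSekL, s ≠ [] := by decide

theorem pv_master_nodup : pvSekL.Nodup := by decide

theorem pvScan_nil (K : List (List Char)) : pvScan K [] = [] := by
  simp [pvScan]

theorem pvScan_cons_some (K : List (List Char)) (c : Char) (t s : List Char)
    (h : K.find? (fun s => s.isPrefixOf (c :: t)) = some s) :
    pvScan K (c :: t) = (s ++ pvSuf) ++ pvScan K (t.drop (s.length - 1)) := by
  rw [pvScan, h]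

theorem pvScan_cons_none (K : List (List Char)) (c : Char) (t : List Char)
    (h : K.find? (fun s => s.isPrefixOf (c :: t)) = none) :
    pvScan K (c :: t) = c :: pvScan K t := by
  rw [pvScan, h]

theorem pvScan_empty (t : List Char) : pvScan [] t = t := by
  induction t with
  | nil => exact pvScan_nil []
  | cons c t ih => rw [pvScan_cons_none _ _ _ (by simp), ih]

-- a block none of whose nonempty suffixes is prefix-comparable with any pattern passes through
theorem pvScan_append (K : List (List Char)) (u v : List Char)
    (h : ∀ w, w <:+ u → w ≠ [] → ∀ k ∈ K, ¬ k <+: w ∧ ¬ w <+: k) :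
    pvScan K (u ++ v) = u ++ pvScan K v := by
  induction u with
  | nil => simp
  | cons c u' ih =>
    have hf : K.find? (fun s => s.isPrefixOf (c :: (u' ++ v))) = none := by
      rw [List.find?_eq_none]
      intro k hk hpre
      rw [List.isPrefixOf_iff_prefix] at hpre
      have hcu : (c :: u') <+: (c :: u') ++ v := List.prefix_append _ _
      have hd := List.prefix_or_prefix_of_prefix hpre hcu
      have hcond := h (c :: u') List.suffix_rfl (by simp) k hk
      rcases hd with hd | hd
      · exact hcond.1 hd
      · exact hcond.2 hd
    rw [List.cons_append, pvScan_cons_none _ _ _ hf,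
        ih (fun w hw hne k hk => h w (hw.trans (List.suffix_cons c u')) hne k hk)]
    rfl

-- occurrences of a suffix of s at position 0 are unaffected by scanning with K
theorem pvScan_prefix_iff (s : List Char) (K : List (List Char)) (hG : pvGOOD s K) :
    ∀ t p, p <:+ s → p ≠ [] → (p <+: pvScan K t ↔ p <+: t) := by
  suffices h : ∀ n t, t.length = n → ∀ p, p <:+ s → p ≠ [] → (p <+: pvScan K t ↔ p <+: t) by
    intro t; exact h t.length t rfl
  intro n
  induction n using Nat.strong_induction_on with
  | _ n ih =>
    intro t hlen p hps hpne
    match t with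
    | [] => rw [pvScan_nil]
    | c :: t' =>
      cases hf : K.find? (fun k => k.isPrefixOf (c :: t')) with
      | some k₀ =>
        have hk₀K : k₀ ∈ K := List.mem_of_find?_eq_some hf
        have hk₀pre : k₀ <+: (c :: t') := by
          have := List.find?_some hf
          exact List.isPrefixOf_iff_prefix.1 (by simpa using this)
        obtain ⟨-, hOK⟩ := hG
        obtain ⟨hk₀ne, ⟨hlen₀, hsk⟩, -⟩ := hOK k₀ hk₀K
        have hplen : p.length ≤ s.length := List.IsSuffix.length_le hps
        have hpair := hsk p hps hpne
        have hL : ¬ p <+: pvScan K (c :: t') := by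
          intro hp
          rw [pvScan_cons_some _ _ _ _ hf] at hp
          rcases List.prefix_or_prefix_of_prefix hp (List.prefix_append _ _) with h1 | h1
          · exact hpair.1 h1
          · have hpe : k₀ ++ pvSuf = p := h1.eq_of_length_le (by simp; omega)
            exact hpair.1 (hpe ▸ List.prefix_rfl)
        have hR : ¬ p <+: (c :: t') := by
          intro hp
          rcases List.prefix_or_prefix_of_prefix hp hk₀pre with h1 | h1
          · exact hpair.1 (h1.trans (List.prefix_append _ _))
          · exact hpair.2 h1
        exact iff_of_false hL hR
      | none =>
        rw [pvScan_cons_none _ _ _ hf]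
        match p, hpne with
        | c₁ :: p', _ =>
          rw [List.cons_prefix_cons, List.cons_prefix_cons]
          rcases eq_or_ne p' [] with hp' | hp'
          · subst hp'; simp
          · have hps' : p' <:+ s := (List.suffix_cons c₁ p').trans hps
            have hiff := ih t'.length (by simp at hlen; omega) t' rfl p' hps' hp'
            rw [hiff]

-- the key commutation: one more single-pattern pass after scanning with K = scanning with K ++ [s]
theorem pvScan_scan (s : List Char) (K : List (List Char)) (hG : pvGOOD s K) :
    ∀ t, pvScan [s] (pvScan K t) = pvScan (K ++ [s]) t := by
  suffices h : ∀ n t, t.length = n → pvScan [s] (pvScan K t) = pvScan (K ++ [s]) t by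
    intro t; exact h t.length t rfl
  intro n
  induction n using Nat.strong_induction_on with
  | _ n ih =>
    intro t hlen
    obtain ⟨hsne, hOK⟩ := hG
    match t with
    | [] => rw [pvScan_nil, pvScan_nil, pvScan_nil]
    | c :: t' =>
      cases hf : K.find? (fun k => k.isPrefixOf (c :: t')) with
      | some k₀ =>
        have hk₀K : k₀ ∈ K := List.mem_of_find?_eq_some hf
        obtain ⟨hk₀ne, -, hks⟩ := hOK k₀ hk₀K
        have hf2 : (K ++ [s]).find? (fun k => k.isPrefixOf (c :: t')) = some k₀ := by
          rw [List.find?_append, hf]; rfl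
        rw [pvScan_cons_some _ _ _ _ hf, pvScan_cons_some _ _ _ _ hf2,
            pvScan_append [s] (k₀ ++ pvSuf) _
              (fun w hw hne k hk => by
                simp at hk; subst hk
                have := hks w hw hne
                exact ⟨this.2, this.1⟩),
            ih (t'.drop (k₀.length - 1)).length (by simp at hlen ⊢; omega) _ rfl]
      | none =>
        by_cases hs : s.isPrefixOf (c :: t')
        · -- the new pattern matches here
          obtain ⟨t₂, ht⟩ : ∃ t₂, s ++ t₂ = c :: t' := List.isPrefixOf_iff_prefix.1 hs
          have hpass : ∀ w, w <:+ s → w ≠ [] → ∀ k ∈ K, ¬ k <+: w ∧ ¬ w <+: k := by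
            intro w hw hne k hk
            obtain ⟨-, ⟨-, hsk⟩, -⟩ := hOK k hk
            have := hsk w hw hne
            exact ⟨this.2, fun hc => this.1 (hc.trans (List.prefix_append _ _))⟩
          match s, hsne, hs, ht with
          | c₀ :: s', _, hs, ht =>
            have hxy := ht
            rw [List.cons_append] at hxy
            injection hxy with hc₀ ht'
            subst hc₀
            have hKpass : pvScan K ((c₀ :: s') ++ t₂) = (c₀ :: s') ++ pvScan K t₂ :=
              pvScan_append K _ _ hpass
            rw [← ht, hKpass, List.cons_append, List.cons_append]
            have hfB : ([c₀ :: s'] : List (List Char)).find?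
                (fun k => k.isPrefixOf (c₀ :: (s' ++ pvScan K t₂))) = some (c₀ :: s') := by
              have hp : (c₀ :: s').isPrefixOf (c₀ :: (s' ++ pvScan K t₂)) = true := by
                rw [List.isPrefixOf_iff_prefix, ← List.cons_append]
                exact List.prefix_append _ _
              simp [hp]
            rw [pvScan_cons_some _ _ _ _ hfB]
            have hfA : (K ++ [c₀ :: s']).find?
                (fun k => k.isPrefixOf (c₀ :: (s' ++ t₂))) = some (c₀ :: s') := by
              rw [List.find?_append]
              have h0 : K.find? (fun k => k.isPrefixOf (c₀ :: (s' ++ t₂))) = none := by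
                rw [ht']; exact hf
              rw [h0]
              have hp : (c₀ :: s').isPrefixOf (c₀ :: (s' ++ t₂)) = true := by
                rw [List.isPrefixOf_iff_prefix, ← List.cons_append]
                exact List.prefix_append _ _
              simp [hp]
            rw [pvScan_cons_some _ _ _ _ hfA]
            have hdrop : ∀ (X : List Char), (s' ++ X).drop ((c₀ :: s').length - 1) = X := by
              intro X; simp
            have hlt : t₂.length < n := by
              have := congrArg List.length ht
              simp at this hlen
              omega
            rw [hdrop, hdrop, ih t₂.length hlt t₂ rfl]
        · -- no pattern matches here
          have hfB2 : ([s] : List (List Char)).find?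
              (fun k => k.isPrefixOf (c :: pvScan K t')) = none := by
            have hnp : ¬ s <+: (c :: pvScan K t') := by
              have h1 : ¬ s <+: (c :: t') := fun hc => hs (List.isPrefixOf_iff_prefix.2 hc)
              have h2 := pvScan_prefix_iff s K ⟨hsne, hOK⟩ (c :: t') s List.suffix_rfl hsne
              rw [pvScan_cons_none _ _ _ hf] at h2
              exact fun hc => h1 (h2.1 hc)
            rw [List.find?_eq_none]
            intro k hk
            simp at hk; subst hk
            intro hc
            exact hnp (List.isPrefixOf_iff_prefix.1 hc)
          have hfA2 : (K ++ [s]).find? (fun k => k.isPrefixOf (c :: t')) = none := by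
            rw [List.find?_append, hf, Option.none_or, List.find?_eq_none]
            intro k hk
            simp at hk; subst hk
            intro hc
            exact hs hc
          rw [pvScan_cons_none _ _ _ hf, pvScan_cons_none _ _ _ hfB2,
              pvScan_cons_none _ _ _ hfA2,
              ih t'.length (by simp at hlen; omega) t' rfl]

theorem pvFoldl_scan (L K : List (List Char)) (t : List Char)
    (hsub : ∀ x ∈ K ++ L, x ∈ pvSekL) (hnd : (K ++ L).Nodup) :
    L.foldl (fun l s => pvScan [s] l) (pvScan K t) = pvScan (K ++ L) t := by
  induction L generalizing K t with
  | nil => simp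
  | cons s L' ih =>
    rw [List.foldl_cons]
    have hsK : s ∈ pvSekL := hsub s (by simp)
    have hGood : pvGOOD s K := by
      refine ⟨pv_master_ne s hsK, fun k hk => ?_⟩
      have hkS : k ∈ pvSekL := hsub k (by simp [hk])
      have hne : s ≠ k := by
        intro he
        rcases List.nodup_append.1 hnd with ⟨-, -, hdisj⟩
        exact hdisj k hk s (by simp) (he ▸ rfl)
      have hp := pvPairOK_correct s k (pv_master_pair s hsK k hkS hne)
      exact ⟨pv_master_ne k hkS, hp.1, hp.2⟩
    rw [pvScan_scan s K hGood t]
    have harr : K ++ s :: L' = (K ++ [s]) ++ L' := by simp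
    rw [harr] at hsub hnd ⊢
    exact ih (K ++ [s]) t hsub hnd

theorem pvGo_eq (k : List Char) (hk : k ≠ []) :
    ∀ fuel (l acc : List Char), l.length ≤ fuel →
      PySem.Chars.replace.go k (k ++ pvSuf) fuel l acc = acc.reverse ++ pvScan [k] l := by
  intro fuel
  induction fuel with
  | zero =>
    intro l acc hl
    have hnil : l = [] := List.eq_nil_of_length_eq_zero (Nat.le_zero.1 hl)
    subst hnil
    rw [PySem.Chars.replace.go.eq_def]
    simp [pvScan_nil]
  | succ fuel ih =>
    intro l acc hl
    match l with
    | [] => rw [PySem.Chars.replace.go.eq_def]; simp [pvScan_nil]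
    | c :: t =>
      obtain ⟨m, hm⟩ : ∃ m, k.length = m + 1 := by
        cases k with
        | nil => exact absurd rfl hk
        | cons a b => exact ⟨b.length, rfl⟩
      rw [PySem.Chars.replace.go.eq_def]
      by_cases hpre : k.isPrefixOf (c :: t)
      · simp only [hpre, if_true]
        rw [ih _ _ (by simp at hl ⊢; omega)]
        have hdrop : (c :: t).drop k.length = t.drop (k.length - 1) := by
          rw [hm]; simp
        have hfk : ([k] : List (List Char)).find? (fun s => s.isPrefixOf (c :: t)) = some k := by
          simp [List.find?, hpre]
        rw [pvScan_cons_some _ _ _ _ hfk, hdrop]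
        simp
      · simp only [hpre, if_false, Bool.false_eq_true]
        rw [ih _ _ (by simp at hl ⊢; omega)]
        have hfk : ([k] : List (List Char)).find? (fun s => s.isPrefixOf (c :: t)) = none := by
          simp [List.find?, hpre]
        rw [pvScan_cons_none _ _ _ hfk]
        simp

theorem pvReplace_eq_scan (k : List Char) (hk : k ≠ []) (l : List Char) :
    PySem.Chars.replace l k (k ++ pvSuf) = pvScan [k] l := by
  rw [PySem.Chars.replace]
  rw [if_neg (by simp [hk])]
  rw [pvGo_eq k hk l.length l [] le_rfl]
  simp

theorem pvA_toList (dtype : String) : ∀ (L : List String) (t : String),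
    (L.foldl (fun tx s => if !(PySem.Str.isIn dtype s) then
        PySem.Str.replace tx s (s ++ " text:display=\"none\"") else tx) t).toList
    = (L.filter fun s => !(PySem.Str.isIn dtype s)).foldl
        (fun l k => PySem.Chars.replace l k.toList (k.toList ++ pvSuf)) t.toList := by
  intro L
  induction L with
  | nil => intro t; simp
  | cons sek L' ih =>
    intro t
    by_cases hc : (!(PySem.Str.isIn dtype sek)) = true
    · simp only [List.foldl_cons, List.filter_cons, hc, if_true, ih]
      congr 2
      rw [PySem.Str.toList_replace]
      congr 1
      rw [String.toList_append]
      rfl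
    · simp only [List.foldl_cons, List.filter_cons, hc, if_false, Bool.false_eq_true, ih]

theorem pv_main (text dtype : String) :
    dohoda_skryt_sekcie text dtype = dohoda_skryt_sekcie_alt text dtype := by
  rw [← String.toList_inj]
  unfold dohoda_skryt_sekcie dohoda_skryt_sekcie_alt
  rw [pvA_toList dtype pvSekcieA text]
  have hBA : pvSekcieB = pvSekcieA := rfl
  rw [hBA]
  set P : String → Bool := fun s => !(PySem.Str.isIn dtype s) with hP
  set keptS : List String := pvSekcieA.filter P with hkeptS
  set keptC : List (List Char) := keptS.map String.toList with hkeptC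
  have hsub : ∀ x ∈ ([] : List (List Char)) ++ keptC, x ∈ pvSekL := by
    intro x hx
    rw [List.nil_append, hkeptC] at hx
    obtain ⟨y, hy, rfl⟩ := List.mem_map.1 hx
    show y.toList ∈ pvSekcieA.map String.toList
    exact List.mem_map_of_mem (List.mem_of_mem_filter (hkeptS ▸ hy))
  have hnd : (([] : List (List Char)) ++ keptC).Nodup := by
    rw [List.nil_append]
    exact (List.Sublist.map String.toList List.filter_sublist).nodup pv_master_nodup
  have hchain : keptS.foldl
      (fun l k => PySem.Chars.replace l k.toList (k.toList ++ pvSuf)) text.toList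
      = pvScan keptC text.toList := by
    have h1 : keptS.foldl
        (fun l k => PySem.Chars.replace l k.toList (k.toList ++ pvSuf)) text.toList
        = keptS.foldl (fun l k => pvScan [k.toList] l) text.toList := by
      apply PySem.List.foldl_congr_mem
      intro acc x hx
      apply pvReplace_eq_scan
      apply pv_master_ne
      exact List.mem_map_of_mem (f := String.toList) (List.mem_of_mem_filter hx)
    have h2 := pvFoldl_scan keptC [] text.toList hsub hnd
    rw [pvScan_empty, List.nil_append] at h2
    rw [h1]
    rw [hkeptC, List.foldl_map] at h2
    exact h2
  by_cases hemp : keptS.isEmpty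
  · have hnil : keptS = [] := List.isEmpty_iff.1 hemp
    rw [if_pos hemp, hnil]
    simp
  · rw [if_neg hemp, String.toList_ofList, hchain]

-- ===== VERDICT (by name: the statement is the Claim_ definition above) =====
theorem dohoda_skryt_sekcie_spec : Claim_equal_dohoda_skryt_sekcie := by
  intro text dtype _
  exact pv_main text dtype
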